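-- pv_equiv track=rewrite | github.com/dkrajzew/degrotesque | degrotesque/marker_html.py | _get_tag_name
-- ===== SOURCE A (Python) =====
-- def _get_tag_name(document) -> str:
--     """Returns the name of the tag that starts at the begin of the given string.
--
--     Args:
--         document (str): The HTML-subpart
--
--     Returns:
--         (str): The name of the tag
--     """
--     i = 0
--     while i<len(document) and (ord(document[i])<=32 or document[i]=="/"):
--         i = i + 1
--     ib = i
--     ie = i
--     while ie<len(document) and document[ie] not in " \n\r\t>/":
--         ie += 1
--     return document[ib:ie]
-- ===== SOURCE B (Python) =====
-- def _get_tag_name(document) -> str: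
--     # single forward pass with a two-state machine: in the 'skipping' state
--     # leading chars with ord<=32 or '/' are consumed; the first other char
--     # switches to 'reading', where chars are collected until a stop char.
--     name = []
--     reading = False
--     for c in document:
--         if not reading and (ord(c) <= 32 or c == "/"):
--             continue
--         if c in " \n\r\t>/":
--             break
--         reading = True
--         name.append(c)
--     return "".join(name)
-- ===== Notes on version B (the rewrite author's own statement) =====
-- stated objective: alternative
-- what changed: Replaced A's two staged index-advancing while-loops plus slice arithmetic by one single-pass two-state machine over the characters that accumulates the name directly and breaks at the first stop character.
import Mathlib
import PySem

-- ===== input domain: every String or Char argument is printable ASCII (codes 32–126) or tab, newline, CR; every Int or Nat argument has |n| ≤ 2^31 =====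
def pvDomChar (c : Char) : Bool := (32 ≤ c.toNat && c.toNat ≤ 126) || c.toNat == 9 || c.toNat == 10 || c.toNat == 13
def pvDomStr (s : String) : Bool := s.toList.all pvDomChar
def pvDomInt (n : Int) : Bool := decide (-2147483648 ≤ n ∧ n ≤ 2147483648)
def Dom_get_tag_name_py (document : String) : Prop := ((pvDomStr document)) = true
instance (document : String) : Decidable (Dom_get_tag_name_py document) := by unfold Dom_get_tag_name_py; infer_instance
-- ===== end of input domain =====

-- B replaces A's two staged index-advancing while-loops and slice arithmetic by a single
-- forward pass with a two-state machine that accumulates the name directly (objective: alternative).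

-- ===== PORT A =====
-- first while-loop of A: advance i past chars with ord<=32 or '/'
def pvASkip (cs : List Char) (i : Nat) : Nat :=
  if h : i < cs.length then
    if cs[i].toNat ≤ 32 || cs[i] == '/' then pvASkip cs (i + 1) else i
  else i
termination_by cs.length - i

-- second while-loop of A: advance ie while the char is not in " \n\r\t>/"
def pvAEnd (cs : List Char) (i : Nat) : Nat :=
  if h : i < cs.length then
    if !(cs[i] == ' ' || cs[i] == '\n' || cs[i] == '\r' || cs[i] == '\t' || cs[i] == '>' || cs[i] == '/') then
      pvAEnd cs (i + 1)
    else i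
  else i
termination_by cs.length - i

def get_tag_name_py (document : String) : String :=
  let cs := document.toList
  let ib := pvASkip cs 0
  let ie := pvAEnd cs ib
  -- document[ib:ie] with 0 ≤ ib ≤ ie ≤ len: exact as drop/take
  String.ofList ((cs.drop ib).take (ie - ib))

-- ===== PORT B =====
def pvSkipChar (c : Char) : Bool := c.toNat ≤ 32 || c == '/'
def pvStopChar (c : Char) : Bool :=
  c == ' ' || c == '\n' || c == '\r' || c == '\t' || c == '>' || c == '/'

-- the single-pass state machine of Source B: `reading` is the state flag,
-- `continue` = recurse in state false, `break` = stop, append = cons + state true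
def pvScanB (cs : List Char) (reading : Bool) : List Char :=
  match cs with
  | [] => []
  | c :: t =>
    if !reading && pvSkipChar c then pvScanB t false
    else if pvStopChar c then []
    else c :: pvScanB t true

def get_tag_name_py_alt (document : String) : String :=
  String.ofList (pvScanB document.toList false)

-- ===== PRECONDITION & SPEC =====
def Spec_get_tag_name_py (document : String) (out : String) : Prop := out = get_tag_name_py_alt document
instance (document : String) (out : String) : Decidable (Spec_get_tag_name_py document out) := by unfold Spec_get_tag_name_py; infer_instance

-- ===== CLAIM (what is proved, stated in full; the proofs are below) =====
def Claim_equal_get_tag_name_py : Prop := ∀ (document : String), Dom_get_tag_name_py document → Spec_get_tag_name_py document (get_tag_name_py document)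

-- ===== LEMMAS AND PROOFS =====

theorem pvASkip_eq (cs : List Char) (i : Nat) :
    pvASkip cs i = i + ((cs.drop i).takeWhile pvSkipChar).length := by
  induction i using pvASkip.induct cs with
  | case1 i h hc ih =>
      rw [pvASkip, dif_pos h, if_pos hc, ih,
        List.drop_eq_getElem_cons h, List.takeWhile_cons_of_pos (by simpa [pvSkipChar] using hc)]
      simp; omega
  | case2 i h hc =>
      rw [pvASkip, dif_pos h, if_neg hc,
        List.drop_eq_getElem_cons h, List.takeWhile_cons_of_neg (by simpa [pvSkipChar] using hc)]
      simp
  | case3 i h =>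
      rw [pvASkip, dif_neg h, List.drop_eq_nil_of_le (by omega)]
      simp

theorem pvAEnd_eq (cs : List Char) (i : Nat) :
    pvAEnd cs i = i + ((cs.drop i).takeWhile (fun c => !pvStopChar c)).length := by
  induction i using pvAEnd.induct cs with
  | case1 i h hc ih =>
      rw [pvAEnd, dif_pos h, if_pos hc, ih,
        List.drop_eq_getElem_cons h, List.takeWhile_cons_of_pos (by simpa [pvStopChar] using hc)]
      simp; omega
  | case2 i h hc =>
      rw [pvAEnd, dif_pos h, if_neg hc,
        List.drop_eq_getElem_cons h, List.takeWhile_cons_of_neg (by simpa [pvStopChar] using hc)]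
      simp
  | case3 i h =>
      rw [pvAEnd, dif_neg h, List.drop_eq_nil_of_le (by omega)]
      simp

theorem pv_dropWhile_eq_drop (p : Char → Bool) (l : List Char) :
    l.dropWhile p = l.drop (l.takeWhile p).length := by
  induction l with
  | nil => rfl
  | cons c t ih => by_cases h : p c <;> simp [h, ih]

theorem pv_takeWhile_eq_take (p : Char → Bool) (l : List Char) :
    l.takeWhile p = l.take (l.takeWhile p).length := by
  induction l with
  | nil => rfl
  | cons c t ih =>
      by_cases h : p c <;> simp [h]
      exact ih

-- the reading state collects exactly a takeWhile of non-stop chars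
theorem pvScanB_true (cs : List Char) :
    pvScanB cs true = cs.takeWhile (fun c => !pvStopChar c) := by
  induction cs with
  | nil => rfl
  | cons c t ih =>
      by_cases h : pvStopChar c <;> simp [pvScanB, h, ih]

-- the skipping state realises dropWhile-then-takeWhile
theorem pvScanB_false (cs : List Char) :
    pvScanB cs false = (cs.dropWhile pvSkipChar).takeWhile (fun c => !pvStopChar c) := by
  induction cs with
  | nil => rfl
  | cons c t ih =>
      by_cases hs : pvSkipChar c
      · simpa [pvScanB, hs] using ih
      · by_cases hst : pvStopChar c <;>
          simp [pvScanB, hs, hst, pvScanB_true]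

-- ===== VERDICT (by name: the statement is the Claim_ definition above) =====
theorem get_tag_name_py_spec : Claim_equal_get_tag_name_py := by
  intro document _
  unfold Spec_get_tag_name_py get_tag_name_py get_tag_name_py_alt
  set cs := document.toList with hcs
  have hskip : pvASkip cs 0 = (cs.takeWhile pvSkipChar).length := by
    simpa using pvASkip_eq cs 0
  have hdrop : cs.drop (pvASkip cs 0) = cs.dropWhile pvSkipChar := by
    rw [hskip, ← pv_dropWhile_eq_drop]
  have hend : pvAEnd cs (pvASkip cs 0) - pvASkip cs 0
      = ((cs.dropWhile pvSkipChar).takeWhile (fun c => !pvStopChar c)).length := by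
    rw [pvAEnd_eq cs (pvASkip cs 0), hdrop]; omega
  simp only []
  rw [hdrop, hend, pvScanB_false, ← pv_takeWhile_eq_take]
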